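-- pv_equiv track=rewrite | github.com/Peteous/Twitter-Bot | AuthCodes.py | _stripID
-- ===== SOURCE A (Python) =====
-- def _stripID(text):
-- 	equals = 0
-- 	code = ''
-- 	for index in range(len(text)):
-- 		if text[index] == '"' and not equals == 1:
-- 			equals = 1
-- 		elif equals == 1 and not text[index] == '"':
-- 			code += text[index]
-- 	return code.rstrip()
-- ===== SOURCE B (Python) =====
-- def _stripID(text):
-- 	i = text.find('"')
-- 	if i == -1:
-- 		return ''
-- 	return text[i + 1:].replace('"', '').rstrip()
-- ===== Notes on version B (the rewrite author's own statement) =====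
-- stated objective: faster
-- what changed: Replaces the char-by-char state-machine loop with a find+slice+replace+rstrip string-method pipeline.
import Mathlib
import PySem

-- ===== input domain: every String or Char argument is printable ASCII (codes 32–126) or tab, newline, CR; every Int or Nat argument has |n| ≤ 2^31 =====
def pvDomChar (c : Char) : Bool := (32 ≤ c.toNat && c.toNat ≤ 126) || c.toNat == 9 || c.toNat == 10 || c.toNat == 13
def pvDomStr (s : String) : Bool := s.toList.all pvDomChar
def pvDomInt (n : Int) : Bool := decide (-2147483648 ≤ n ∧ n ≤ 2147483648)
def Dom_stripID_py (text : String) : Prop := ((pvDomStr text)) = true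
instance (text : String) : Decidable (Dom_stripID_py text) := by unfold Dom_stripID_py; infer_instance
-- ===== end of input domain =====

-- B replaces A's char-by-char state-machine loop with a find+slice+replace+rstrip pipeline (idiomatic).

-- ===== PORT A =====
-- loop body of A: state = (equals, code)
def pvStepA (st : Int × List Char) (c : Char) : Int × List Char :=
  if c = '"' ∧ ¬ (st.1 = 1) then (1, st.2)
  else if st.1 = 1 ∧ ¬ (c = '"') then (st.1, st.2 ++ [c])
  else st

def stripID_py (text : String) : String :=
  let st : Int × List Char :=
    (PySem.List.pyRange 0 (PySem.Str.len text) 1).foldl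
      (fun st index => pvStepA st (PySem.List.pyGetD text.toList index ' ')) (0, [])
  String.ofList (PySem.Chars.rstrip st.2)

-- ===== PORT B =====
def stripID_py_alt (text : String) : String :=
  let i := PySem.Str.find text "\""
  if i = -1 then ""
  else PySem.Str.rstrip (PySem.Str.replace (PySem.Str.slice text (some (i + 1)) none) "\"" "")

-- ===== PRECONDITION & SPEC =====
def Spec_stripID_py (text : String) (out : String) : Prop := out = stripID_py_alt text
instance (text : String) (out : String) : Decidable (Spec_stripID_py text out) := by unfold Spec_stripID_py; infer_instance

-- ===== CLAIM (what is proved, stated in full; the proofs are below) =====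
def Claim_equal_stripID_py : Prop := ∀ (text : String), Dom_stripID_py text → Spec_stripID_py text (stripID_py text)

-- ===== LEMMAS AND PROOFS =====

-- phase equals = 1: every remaining non-quote char is appended
theorem pv_foldl_one (l : List Char) (code : List Char) :
    l.foldl pvStepA (1, code) = (1, code ++ l.filter (fun c => c ≠ '"')) := by
  induction l generalizing code with
  | nil => simp
  | cons c t ih =>
    by_cases hc : c = '"' <;> simp [pvStepA, hc, List.foldl_cons, ih]

-- phase equals = 0: the code accumulated is the non-quote chars after the first quote
theorem pv_foldl_zero (l : List Char) :
    (l.foldl pvStepA (0, [])).2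
      = ((List.dropWhile (fun c => c ≠ '"') l).tail).filter (fun c => c ≠ '"') := by
  induction l with
  | nil => simp
  | cons c t ih =>
    by_cases hc : c = '"'
    · simp [pvStepA, hc, List.foldl_cons, pv_foldl_one]
    · simpa [pvStepA, hc, List.foldl_cons] using ih

-- replace.go with old = ['"'], new = [] is a filter
theorem pv_replace_go (fuel : Nat) (l acc : List Char) (h : l.length ≤ fuel) :
    PySem.Chars.replace.go ['"'] [] fuel l acc
      = acc.reverse ++ l.filter (fun c => c ≠ '"') := by
  induction fuel generalizing l acc with
  | zero =>
    have : l = [] := List.length_eq_zero_iff.mp (Nat.le_zero.mp h)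
    subst this; simp [PySem.Chars.replace.go]
  | succ n ih =>
    cases l with
    | nil => simp [PySem.Chars.replace.go]
    | cons c t =>
      by_cases hc : c = '"'
      · subst hc
        simp only [PySem.Chars.replace.go, List.isPrefixOf, BEq.rfl, Bool.true_and,
          if_pos, List.reverse_nil, List.nil_append]
        rw [show List.drop ['"'].length ('"' :: t) = t from rfl,
          ih t acc (by simpa using Nat.le_of_succ_le_succ (by simpa using h))]
        simp
      · have hpre : (['"'].isPrefixOf (c :: t)) = false := by
          simp [List.isPrefixOf]; exact fun h' => (hc h'.symm).elim
        simp only [PySem.Chars.replace.go, hpre, Bool.false_eq_true, if_false]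
        rw [ih t (c :: acc) (by simpa using Nat.le_of_succ_le_succ (by simpa using h))]
        simp [hc]

theorem pv_replace_filter (l : List Char) :
    PySem.Chars.replace l ['"'] [] = l.filter (fun c => c ≠ '"') := by
  simpa [PySem.Chars.replace] using pv_replace_go l.length l [] le_rfl

-- first-occurrence position and dropWhile
theorem pv_dropWhile_eq_drop (l : List Char) (j : Nat)
    (hlt : ∀ i < j, ¬ ['"'] <+: l.drop i) (hj : ['"'] <+: l.drop j) :
    List.dropWhile (fun c => c ≠ '"') l = l.drop j := by
  induction l generalizing j with
  | nil => simp at hj ⊢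
  | cons c t ih =>
    cases j with
    | zero =>
      obtain ⟨s, hs⟩ := hj
      simp at hs
      have hc : c = '"' := hs.1.symm
      simp [List.dropWhile, hc]
    | succ k =>
      have h0 : ¬ ['"'] <+: (c :: t) := hlt 0 (Nat.succ_pos k)
      have hc : c ≠ '"' := by
        intro hcq; exact h0 ⟨t, by simp [hcq]⟩
      rw [List.dropWhile_cons_of_pos (by simpa using hc), List.drop_succ_cons]
      exact ih k (fun i hi => by simpa using hlt (i + 1) (Nat.succ_lt_succ hi)) (by simpa using hj)

theorem pv_quote_toList : ("\u0022" : String).toList = ['\u0022'] := by decide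

theorem pv_main (text : String) : stripID_py text = stripID_py_alt text := by
  rw [← String.toList_inj]
  unfold stripID_py stripID_py_alt
  have hlen : PySem.Str.len text = PySem.List.len text.toList := by
    simp [PySem.Str.len_eq, PySem.List.len]
  rw [hlen, PySem.List.foldl_pyRange_pyGetD text.toList ' ' pvStepA (0, []) (le_refl 0)]
  simp only [Int.toNat_zero, List.drop_zero]
  rw [pv_foldl_zero]
  have hfind : PySem.Str.find text "\u0022" = PySem.Chars.find text.toList ['\u0022'] := by
    rw [PySem.Str.find_eq, pv_quote_toList]
  by_cases hneg : PySem.Chars.find text.toList ['\u0022'] = -1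
  · have hmem : '\u0022' ∉ text.toList := by
      intro hm
      obtain ⟨s, t, hst⟩ := List.append_of_mem hm
      exact (PySem.Chars.find_eq_neg_one_iff text.toList ['\u0022']).mp hneg ⟨s, t, by simp [hst]⟩
    have hdw : List.dropWhile (fun c => c ≠ '\u0022') text.toList = [] :=
      List.dropWhile_eq_nil_iff.mpr (fun a ha => by
        simp only [decide_eq_true_eq]
        intro h; exact hmem (h ▸ ha))
    rw [hfind, if_pos hneg, hdw]
    simp [PySem.Chars.rstrip]
  · have hnn : 0 ≤ PySem.Chars.find text.toList ['\u0022'] := by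
      have := PySem.Chars.neg_one_le_find text.toList ['\u0022']
      omega
    obtain ⟨hpre, hmin⟩ := PySem.Chars.find_spec hnn
    have hdw := pv_dropWhile_eq_drop text.toList (PySem.Chars.find text.toList ['\u0022']).toNat
      (fun i hi => hmin i hi) hpre
    rw [hfind, if_neg hneg]
    rw [PySem.Str.toList_rstrip, PySem.Str.toList_replace, PySem.Str.toList_slice,
      pv_quote_toList, show ("" : String).toList = [] from rfl]
    have hslice : PySem.Chars.slice text.toList
        (some (PySem.Chars.find text.toList ['\u0022'] + 1)) none
        = text.toList.drop ((PySem.Chars.find text.toList ['\u0022']).toNat + 1) := by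
      rw [PySem.Chars.slice_eq_listSlice, PySem.List.slice_from text.toList (by omega)]
      congr 1
      omega
    rw [hslice, pv_replace_filter, hdw, List.tail_drop]
    exact String.toList_ofList

-- ===== VERDICT (by name: the statement is the Claim_ definition above) =====
theorem stripID_py_spec : Claim_equal_stripID_py := by
  intro text _
  exact pv_main text
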